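-- pv_equiv track=rewrite | github.com/frostdpr/word-search-robot | pipeline.py | binary_num
-- ===== SOURCE A (Python) =====
-- def binary_num(bin_str, max_length):
--
--     l = len(bin_str)
--     num = list(bin_str)
--     i = l - 1
--
--     while i >= 0:
--         if num[i] == "0":
--             num[i] = "1"
--             break
--         else:
--             num[i] = "0"
--         i -= 1
--
--     bin_str = "".join(num)
--
--     if i < 0:
--         bin_str = "1" + bin_str
--
--     if len(bin_str) > max_length:
--
--         bin_str = ""
--
--         for i in range(max_length):
--             bin_str += "0"
--
--     return bin_str
-- ===== SOURCE B (Python) =====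
-- def binary_num(bin_str, max_length):
--     idx = bin_str.rfind('0')
--     if idx == -1:
--         result = '1' + '0' * len(bin_str)
--     else:
--         result = bin_str[:idx] + '1' + '0' * (len(bin_str) - idx - 1)
--     if len(result) > max_length:
--         result = '0' * max_length
--     return result
-- ===== Notes on version B (the rewrite author's own statement) =====
-- stated objective: simpler
-- what changed: Replaced the explicit right-to-left flipping loop over a char list (and the char-by-char overflow rebuild loop) with a single rfind('0') plus slice-based reconstruction of the result.
import Mathlib
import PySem

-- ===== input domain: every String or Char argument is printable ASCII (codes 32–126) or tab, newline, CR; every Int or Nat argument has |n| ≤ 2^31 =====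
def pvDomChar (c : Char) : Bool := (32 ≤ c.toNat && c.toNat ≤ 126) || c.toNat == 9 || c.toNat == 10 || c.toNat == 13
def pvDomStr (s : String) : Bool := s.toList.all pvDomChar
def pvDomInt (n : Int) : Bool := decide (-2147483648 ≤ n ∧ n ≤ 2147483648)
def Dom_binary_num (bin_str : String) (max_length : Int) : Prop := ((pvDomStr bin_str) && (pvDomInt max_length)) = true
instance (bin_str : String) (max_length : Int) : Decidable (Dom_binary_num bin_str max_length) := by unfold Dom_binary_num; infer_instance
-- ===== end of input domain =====

-- B replaces A's right-to-left ripple loop by locating the last '0' (rfind) and rebuilding the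
-- string from slices; simpler decomposition, same exact behaviour (proved equal on all inputs).

-- ===== PORT A =====
-- A's while loop runs i from l-1 down to 0 over the mutable char list; we transliterate it as a
-- structural recursion over the REVERSED list (head = Python's current num[i]), returning the
-- processed (still reversed) list and whether `break` fired (Python's exit with i ≥ 0).
def binNumAuxA : List Char → List Char × Bool
  | [] => ([], false)
  | c :: rest =>
    if c = '0' then ('1' :: rest, true)
    else
      let r := binNumAuxA rest
      ('0' :: r.1, r.2)

def binary_num (bin_str : String) (max_length : Int) : String :=
  let num := bin_str.toList
  let res := binNumAuxA num.reverse
  let s := res.1.reverse                      -- bin_str = "".join(num)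
  let s := if res.2 then s else '1' :: s      -- if i < 0: bin_str = "1" + bin_str
  if (s.length : Int) > max_length then
    -- bin_str = ""; for i in range(max_length): bin_str += "0"
    String.ofList ((PySem.List.pyRange 0 max_length 1).foldl (fun acc _ => acc ++ ['0']) [])
  else String.ofList s

-- ===== PORT B =====
def binary_num_alt (bin_str : String) (max_length : Int) : String :=
  let cs := bin_str.toList
  -- idx = bin_str.rfind('0'): for a one-character needle this is exactly the index of the last
  -- '0' (counted from the left), i.e. length-1-j where j is the first '0' of the reversed list.
  let result :=
    match cs.reverse.findIdx? (· == '0') with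
    | none => '1' :: List.replicate cs.length '0'            -- '1' + '0'*len(bin_str)
    | some j =>
      let i := cs.length - 1 - j
      cs.take i ++ '1' :: List.replicate (cs.length - i - 1) '0'  -- bin_str[:i] + '1' + '0'*(l-i-1)
  if (result.length : Int) > max_length then String.ofList (List.replicate max_length.toNat '0')
  else String.ofList result

-- ===== PRECONDITION & SPEC =====
def Spec_binary_num (bin_str : String) (max_length : Int) (out : String) : Prop := out = binary_num_alt bin_str max_length
instance (bin_str : String) (max_length : Int) (out : String) : Decidable (Spec_binary_num bin_str max_length out) := by unfold Spec_binary_num; infer_instance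

-- ===== CLAIM (what is proved, stated in full; the proofs are below) =====
def Claim_equal_binary_num : Prop := ∀ (bin_str : String) (max_length : Int), Dom_binary_num bin_str max_length → Spec_binary_num bin_str max_length (binary_num bin_str max_length)

-- ===== LEMMAS AND PROOFS =====

lemma findIdx?_lt_length {p : Char → Bool} {l : List Char} {j : ℕ}
    (h : l.findIdx? p = some j) : j < l.length := by
  induction l generalizing j with
  | nil => simp at h
  | cons c t ih =>
    rw [List.findIdx?_cons] at h
    by_cases hc : p c
    · simp [hc] at h
      simp [← h]
    · simp [hc] at h
      obtain ⟨j', hj', rfl⟩ := h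
      have := ih hj'
      simp
      omega

lemma binNumAuxA_spec (rs : List Char) :
    binNumAuxA rs =
      match rs.findIdx? (· == '0') with
      | none => (List.replicate rs.length '0', false)
      | some j => (List.replicate j '0' ++ '1' :: rs.drop (j + 1), true) := by
  induction rs with
  | nil => simp [binNumAuxA]
  | cons c t ih =>
    by_cases hc : c = '0'
    · subst hc
      simp [binNumAuxA, List.findIdx?_cons]
    · rw [List.findIdx?_cons]
      have hb : (c == '0') = false := by simp [hc]
      simp only [hb, Bool.false_eq_true, if_false]
      cases ht : t.findIdx? (· == '0') with
      | none =>
        rw [ht] at ih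
        simp only at ih
        simp [binNumAuxA, hc, ih, List.replicate_succ]
      | some j =>
        rw [ht] at ih
        simp only at ih
        simp [binNumAuxA, hc, ih, List.replicate_succ]

lemma foldl_append_zero (l : List Int) (acc : List Char) :
    l.foldl (fun a _ => a ++ ['0']) acc = acc ++ List.replicate l.length '0' := by
  induction l generalizing acc with
  | nil => simp
  | cons x t ih => simp [List.foldl_cons, ih, List.replicate_succ]

-- the pre-overflow strings of A and B coincide
lemma pre_eq (cs : List Char) :
    (if (binNumAuxA cs.reverse).2 then (binNumAuxA cs.reverse).1.reverse
     else '1' :: (binNumAuxA cs.reverse).1.reverse) =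
    (match cs.reverse.findIdx? (· == '0') with
     | none => '1' :: List.replicate cs.length '0'
     | some j =>
       cs.take (cs.length - 1 - j) ++
         '1' :: List.replicate (cs.length - (cs.length - 1 - j) - 1) '0') := by
  rw [binNumAuxA_spec]
  cases h : cs.reverse.findIdx? (· == '0') with
  | none => simp
  | some j =>
    have hj : j < cs.length := by
      have := findIdx?_lt_length h
      simpa using this
    have hdrop : (cs.reverse.drop (j + 1)).reverse = cs.take (cs.length - 1 - j) := by
      rw [List.drop_reverse, List.reverse_reverse]
      congr 1
      omega
    rw [List.reverse_append, List.reverse_cons, List.reverse_replicate, hdrop]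
    have hjj : cs.length - (cs.length - 1 - j) - 1 = j := by omega
    simp [hjj]

-- the final overflow check is the same in both ports
lemma if_over (s : List Char) (m : Int) :
    (if (s.length : Int) > m then
       String.ofList ((PySem.List.pyRange 0 m 1).foldl (fun acc _ => acc ++ ['0']) [])
     else String.ofList s) =
    (if (s.length : Int) > m then String.ofList (List.replicate m.toNat '0')
     else String.ofList s) := by
  split
  · congr 1
    rw [foldl_append_zero]
    simp [PySem.List.length_pyRange_one]
  · rfl

-- ===== VERDICT (by name: the statement is the Claim_ definition above) =====
theorem binary_num_spec : Claim_equal_binary_num := by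
  intro bin_str max_length _
  unfold Spec_binary_num
  simp only [binary_num, binary_num_alt]
  rw [pre_eq bin_str.toList]
  exact if_over _ _
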